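-- pv_equiv track=rewrite | github.com/cecilia2988/Data | Practicando/recorriendo_i_j.py | suma_diez
-- ===== SOURCE A (Python) =====
-- def suma_diez(numeros):
--     arreglo=[]
--     for i in numeros:
--         for j in numeros:
--             if(j+i==10 and j!=i):
--                 if not [j,i] in arreglo and not [i,j] in arreglo:
--                     arreglo.append([i,j])
--     return arreglo
-- ===== SOURCE B (Python) =====
-- def suma_diez(numeros):
--     values = set(numeros)
--     seen = set()
--     out = []
--     for i in numeros:
--         c = 10 - i
--         if c != i and c in values:
--             k = min(i, c)
--             if k not in seen:
--                 seen.add(k)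
--                 out.append([i, c])
--     return out
-- ===== Notes on version B (the rewrite author's own statement) =====
-- stated objective: faster
-- what changed: Replaced the O(n^3) nested scan (inner loop over numeros plus linear membership tests on the growing result list) by a single pass that checks the complement 10-i in a precomputed hash set of values and dedupes unordered pairs via a hash set of min(i,10-i) keys.
import Mathlib
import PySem

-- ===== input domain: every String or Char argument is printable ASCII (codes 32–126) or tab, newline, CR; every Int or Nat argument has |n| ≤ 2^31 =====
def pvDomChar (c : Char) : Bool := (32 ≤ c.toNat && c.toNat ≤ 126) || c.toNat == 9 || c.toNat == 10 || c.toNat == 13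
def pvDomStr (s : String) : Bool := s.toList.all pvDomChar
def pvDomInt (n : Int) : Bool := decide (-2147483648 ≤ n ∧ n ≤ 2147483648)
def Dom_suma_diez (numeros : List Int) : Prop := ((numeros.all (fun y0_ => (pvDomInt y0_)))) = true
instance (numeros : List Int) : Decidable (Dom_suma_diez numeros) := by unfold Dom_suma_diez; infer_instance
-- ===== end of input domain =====

-- B replaces A's O(n^3) nested scans by one pass with a value set and a set of min(i,10-i) pair keys (timing: asymptotically faster).

-- ===== PORT A =====
-- inner loop body of A: for j in numeros: if(j+i==10 and j!=i): if not [j,i] in arreglo and not [i,j] in arreglo: arreglo.append([i,j])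
def sumaDiezInner (i : Int) (arreglo : List (List Int)) (j : Int) : List (List Int) :=
  if j + i = 10 ∧ j ≠ i ∧ ¬ [j, i] ∈ arreglo ∧ ¬ [i, j] ∈ arreglo then arreglo ++ [[i, j]] else arreglo

def suma_diez (numeros : List Int) : List (List Int) :=
  numeros.foldl (fun arreglo i => numeros.foldl (sumaDiezInner i) arreglo) []

-- ===== PORT B =====
-- loop body of B: c = 10-i; if c != i and c in values: k = min(i,c); if k not in seen: seen.add(k); out.append([i,c])
def sumaDiezAltStep (values : PySem.Set Int) (st : List (List Int) × PySem.Set Int) (i : Int) :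
    List (List Int) × PySem.Set Int :=
  let c := 10 - i
  if c ≠ i ∧ PySem.Set.contains values c then
    let k := min i c
    if PySem.Set.contains st.2 k then st
    else (st.1 ++ [[i, c]], PySem.Set.add st.2 k)
  else st

def suma_diez_alt (numeros : List Int) : List (List Int) :=
  let values := PySem.Set.ofList numeros
  (numeros.foldl (sumaDiezAltStep values) ([], PySem.Set.empty)).1

-- ===== PRECONDITION & SPEC =====
def Spec_suma_diez (numeros : List Int) (out : List (List Int)) : Prop := out = suma_diez_alt numeros
instance (numeros : List Int) (out : List (List Int)) : Decidable (Spec_suma_diez numeros out) := by unfold Spec_suma_diez; infer_instance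

-- ===== CLAIM (what is proved, stated in full; the proofs are below) =====
def Claim_equal_suma_diez : Prop := ∀ (numeros : List Int), Dom_suma_diez numeros → Spec_suma_diez numeros (suma_diez numeros)

-- ===== LEMMAS AND PROOFS =====

-- once [i,10-i] is in arreglo, A's inner loop makes no further change
theorem sumaDiez_inner_blocked (i : Int) (js : List Int) (acc : List (List Int))
    (h : [i, 10 - i] ∈ acc) : js.foldl (sumaDiezInner i) acc = acc := by
  induction js with
  | nil => rfl
  | cons j js ih =>
    have hstep : sumaDiezInner i acc j = acc := by
      unfold sumaDiezInner
      rw [if_neg]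
      rintro ⟨h1, _, _, h4⟩
      have : j = 10 - i := by omega
      exact h4 (this ▸ h)
    simp only [List.foldl_cons, hstep, ih]

-- characterisation of A's inner loop
theorem sumaDiez_inner_char (i : Int) (js : List Int) (acc : List (List Int)) :
    js.foldl (sumaDiezInner i) acc =
      if (10 - i) ∈ js ∧ (10 - i) ≠ i ∧ ¬ [10 - i, i] ∈ acc ∧ ¬ [i, 10 - i] ∈ acc
      then acc ++ [[i, 10 - i]] else acc := by
  induction js generalizing acc with
  | nil => simp
  | cons j js ih =>
    by_cases hc : j + i = 10 ∧ j ≠ i ∧ ¬ [j, i] ∈ acc ∧ ¬ [i, j] ∈ acc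
    · obtain ⟨h1, h2, h3, h4⟩ := hc
      have hj : j = 10 - i := by omega
      subst hj
      have hstep : sumaDiezInner i acc (10 - i) = acc ++ [[i, 10 - i]] := by
        unfold sumaDiezInner; rw [if_pos ⟨h1, h2, h3, h4⟩]
      have hmem : [i, 10 - i] ∈ acc ++ [[i, 10 - i]] := by simp
      rw [List.foldl_cons, hstep, sumaDiez_inner_blocked i js _ hmem,
        if_pos ⟨List.mem_cons_self, fun h => h2 h, h3, h4⟩]
    · have hstep : sumaDiezInner i acc j = acc := by
        unfold sumaDiezInner; rw [if_neg hc]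
      rw [List.foldl_cons, hstep, ih]
      by_cases h2 : (10 - i) ∈ js
      · have hiff : ((10 - i) ∈ js ∧ (10 - i) ≠ i ∧ ¬ [10 - i, i] ∈ acc ∧ ¬ [i, 10 - i] ∈ acc) ↔
            ((10 - i) ∈ j :: js ∧ (10 - i) ≠ i ∧ ¬ [10 - i, i] ∈ acc ∧ ¬ [i, 10 - i] ∈ acc) :=
          and_congr_left' (by simp [h2])
        exact if_congr hiff rfl rfl
      · rw [if_neg (fun h => h2 h.1), if_neg]
        rintro ⟨hm, hne, h3, h4⟩
        rcases List.mem_cons.mp hm with he | hm'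
        · exact hc ⟨by omega, fun h => hne (by omega), he ▸ h3, he ▸ h4⟩
        · exact h2 hm'

-- invariant relating A's result list to B's (out, seen) state
def sumaDiezInv (arreglo : List (List Int)) (seen : PySem.Set Int) : Prop :=
  (∀ p ∈ arreglo, ∃ a : Int, p = [a, 10 - a]) ∧
  (∀ k : Int, k ∈ seen ↔ ∃ a : Int, [a, 10 - a] ∈ arreglo ∧ k = min a (10 - a))

theorem sumaDiez_seen_iff (arreglo : List (List Int)) (seen : PySem.Set Int)
    (hinv : sumaDiezInv arreglo seen) (i : Int) :
    min i (10 - i) ∈ seen ↔ ([i, 10 - i] ∈ arreglo ∨ [10 - i, i] ∈ arreglo) := by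
  rw [hinv.2]
  constructor
  · rintro ⟨a, hmem, hk⟩
    have : a = i ∨ a = 10 - i := by omega
    rcases this with h | h
    · exact Or.inl (h ▸ hmem)
    · right
      have : [a, 10 - a] = [10 - i, i] := by subst h; norm_num
      exact this ▸ hmem
  · rintro (h | h)
    · exact ⟨i, h, rfl⟩
    · refine ⟨10 - i, ?_, by omega⟩
      have : [10 - i, 10 - (10 - i)] = [10 - i, i] := by norm_num
      exact this ▸ h

theorem sumaDiez_main (numeros rest : List Int) (arreglo : List (List Int)) (seen : PySem.Set Int)
    (hinv : sumaDiezInv arreglo seen) :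
    rest.foldl (fun acc i => numeros.foldl (sumaDiezInner i) acc) arreglo =
      (rest.foldl (sumaDiezAltStep (PySem.Set.ofList numeros)) (arreglo, seen)).1 := by
  induction rest generalizing arreglo seen with
  | nil => rfl
  | cons i rest ih =>
    rw [List.foldl_cons, List.foldl_cons, sumaDiez_inner_char]
    have hval : PySem.Set.contains (PySem.Set.ofList numeros) (10 - i) = true ↔ (10 - i) ∈ numeros := by
      rw [PySem.Set.contains_iff, PySem.Set.mem_ofList]
    by_cases hout : (10 - i) ≠ i ∧ (10 - i) ∈ numeros
    · by_cases hseen : min i (10 - i) ∈ seen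
      · -- pair already emitted: both sides unchanged
        have hA : ¬((10 - i) ∈ numeros ∧ (10 - i) ≠ i ∧ ¬ [10 - i, i] ∈ arreglo ∧ ¬ [i, 10 - i] ∈ arreglo) := by
          rintro ⟨_, _, h3, h4⟩
          rcases (sumaDiez_seen_iff arreglo seen hinv i).mp hseen with h | h
          · exact h4 h
          · exact h3 h
        have hB : sumaDiezAltStep (PySem.Set.ofList numeros) (arreglo, seen) i = (arreglo, seen) := by
          simp only [sumaDiezAltStep]
          rw [if_pos (show (10 - i) ≠ i ∧ PySem.Set.contains (PySem.Set.ofList numeros) (10 - i) = true from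
              ⟨hout.1, by simpa using hout.2⟩),
            if_pos (show PySem.Set.contains seen (min i (10 - i)) = true by simpa using hseen)]
        rw [if_neg hA, hB]
        exact ih arreglo seen hinv
      · -- new pair: both sides append [i, 10-i]
        have hni : ¬ [i, 10 - i] ∈ arreglo := fun h =>
          hseen ((sumaDiez_seen_iff arreglo seen hinv i).mpr (Or.inl h))
        have hni' : ¬ [10 - i, i] ∈ arreglo := fun h =>
          hseen ((sumaDiez_seen_iff arreglo seen hinv i).mpr (Or.inr h))
        have hB : sumaDiezAltStep (PySem.Set.ofList numeros) (arreglo, seen) i =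
            (arreglo ++ [[i, 10 - i]], PySem.Set.add seen (min i (10 - i))) := by
          simp only [sumaDiezAltStep]
          rw [if_pos (show (10 - i) ≠ i ∧ PySem.Set.contains (PySem.Set.ofList numeros) (10 - i) = true from
              ⟨hout.1, by simpa using hout.2⟩),
            if_neg (show ¬ PySem.Set.contains seen (min i (10 - i)) = true from fun h => hseen (by simpa using h))]
        rw [if_pos ⟨hout.2, hout.1, hni', hni⟩, hB]
        refine ih _ _ ⟨?_, ?_⟩
        · intro p hp
          rcases List.mem_append.mp hp with h | h
          · exact hinv.1 p h
          · exact ⟨i, by simpa using h⟩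
        · intro k
          rw [PySem.Set.mem_add]
          constructor
          · rintro (hk | hk)
            · obtain ⟨a, ha, hka⟩ := (hinv.2 k).mp hk
              exact ⟨a, List.mem_append.mpr (Or.inl ha), hka⟩
            · exact ⟨i, List.mem_append.mpr (Or.inr (by simp)), hk⟩
          · rintro ⟨a, ha, hka⟩
            rcases List.mem_append.mp ha with h | h
            · exact Or.inl ((hinv.2 k).mpr ⟨a, h, hka⟩)
            · have : a = i := by simpa using (List.mem_singleton.mp h)
              exact Or.inr (by subst this; exact hka)
    · -- no complement (or i = 5): both sides unchanged
      have hA : ¬((10 - i) ∈ numeros ∧ (10 - i) ≠ i ∧ ¬ [10 - i, i] ∈ arreglo ∧ ¬ [i, 10 - i] ∈ arreglo) := by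
        rintro ⟨h1, h2, _, _⟩; exact hout ⟨h2, h1⟩
      have hB : sumaDiezAltStep (PySem.Set.ofList numeros) (arreglo, seen) i = (arreglo, seen) := by
        simp only [sumaDiezAltStep]
        rw [if_neg (show ¬ ((10 - i) ≠ i ∧ PySem.Set.contains (PySem.Set.ofList numeros) (10 - i) = true) from
            fun h => hout ⟨h.1, by simpa using h.2⟩)]
      rw [if_neg hA, hB]
      exact ih arreglo seen hinv

-- ===== VERDICT (by name: the statement is the Claim_ definition above) =====
theorem suma_diez_spec : Claim_equal_suma_diez := by
  intro numeros _
  unfold Spec_suma_diez suma_diez suma_diez_alt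
  exact sumaDiez_main numeros numeros [] PySem.Set.empty
    ⟨fun p hp => absurd hp (List.not_mem_nil), fun k => by simp [PySem.Set.empty]⟩
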